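-- pv_equiv track=rewrite | github.com/soon-haari/Tropical-Attack | tropical-attack/tropicalDS.py | pol_times_pol2
-- ===== SOURCE A (Python) =====
-- from collections import OrderedDict
--
-- def pol_times_pol2(R,S):
--     d=len(R)-1
--     g=len(S)-1
--     res=OrderedDict()
--     for m in range(d+g+1):
--         res[m]=[]
--         for i in range(m+1):
--             if i<=d and m-i<=g:
--                 res[m].append(R[i][0]+S[m-i][0])
--     pol_res=[]
--     for key,value in res.items():
--         pol_res.append([min(value),key])
--     return pol_res
-- ===== SOURCE B (Python) =====
-- def pol_times_pol2(R, S):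
--     # Running-minimum table over the (i, j) coefficient grid instead of
--     # building per-degree candidate lists and reducing them with min().
--     n = len(R) + len(S) - 1
--     res = [None] * n
--     for i, r in enumerate(R):
--         ri = r[0]
--         for j, s in enumerate(S):
--             v = ri + s[0]
--             m = i + j
--             if res[m] is None or v < res[m]:
--                 res[m] = v
--     return [[res[m], m] for m in range(n)]
-- ===== Notes on version B (the rewrite author's own statement) =====
-- stated objective: simpler
-- what changed: Instead of building a per-degree candidate list in an OrderedDict (looping m, then i with a bounds check) and reducing each list with min(), B keeps one running-minimum table indexed by degree and fills it in a single pass over the (i,j) coefficient grid with no bounds-check branch and no intermediate lists.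
-- outside the precondition, e.g. on pol_times_pol2([[]], []): A returns [], B raises IndexError
import Mathlib
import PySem

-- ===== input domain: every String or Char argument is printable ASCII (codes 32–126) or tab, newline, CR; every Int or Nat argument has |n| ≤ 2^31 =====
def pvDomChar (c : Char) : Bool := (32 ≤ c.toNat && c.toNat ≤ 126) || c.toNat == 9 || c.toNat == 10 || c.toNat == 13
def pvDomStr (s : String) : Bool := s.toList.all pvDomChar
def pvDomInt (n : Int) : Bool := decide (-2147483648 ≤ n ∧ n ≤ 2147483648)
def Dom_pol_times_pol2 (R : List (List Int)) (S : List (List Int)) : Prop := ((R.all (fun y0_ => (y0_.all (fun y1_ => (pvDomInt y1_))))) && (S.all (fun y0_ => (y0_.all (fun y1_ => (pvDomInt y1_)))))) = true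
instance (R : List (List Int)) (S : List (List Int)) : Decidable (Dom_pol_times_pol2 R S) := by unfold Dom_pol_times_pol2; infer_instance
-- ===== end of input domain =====

-- B replaces A's per-degree candidate lists + min() reduction by a single running-minimum
-- table over the (i,j) coefficient grid (objective: simpler).

-- ===== PORT A =====
-- R[i][0] (in range whenever evaluated under Pre_): pyGetD defaults are never hit on Pre_ inputs
def pvCoef (X : List (List Int)) (i : Int) : Int :=
  PySem.List.pyGetD (PySem.List.pyGetD X i []) 0 0

def pol_times_pol2 (R : List (List Int)) (S : List (List Int)) : List (List Int) :=
  let d : Int := PySem.List.len R - 1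
  let g : Int := PySem.List.len S - 1
  let res : PySem.Dict Int (List Int) :=
    (PySem.List.pyRange 0 (d + g + 1)).foldl
      (fun res m =>
        (PySem.List.pyRange 0 (m + 1)).foldl
          (fun res i =>
            if i ≤ d ∧ m - i ≤ g then
              -- res[m].append(R[i][0] + S[m-i][0])
              res.modify m [] (fun v => v ++ [pvCoef R i + pvCoef S (m - i)])
            else res)
          (res.insert m []))  -- res[m] = []
      PySem.Dict.empty
  -- min(value) is defined on every Pre_ input; the .getD 0 default is never hit there
  res.items.foldl
    (fun pol_res kv => pol_res ++ [[(PySem.List.min? kv.2 (fun x => x)).getD 0, kv.1]]) []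

-- ===== PORT B =====
def pol_times_pol2_alt (R : List (List Int)) (S : List (List Int)) : List (List Int) :=
  let n : Int := PySem.List.len R + PySem.List.len S - 1
  let res : List (Option Int) :=
    (PySem.List.enumerate R).foldl
      (fun res ir =>
        let ri : Int := PySem.List.pyGetD ir.2 0 0   -- r[0]
        (PySem.List.enumerate S).foldl
          (fun res js =>
            let v : Int := ri + PySem.List.pyGetD js.2 0 0   -- ri + s[0]
            let m : Nat := (ir.1 + js.1).toNat               -- i + j (both nonnegative)
            match res.getD m none with
            | none => res.set m (some v)
            | some c => if v < c then res.set m (some v) else res)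
          res)
      (List.replicate n.toNat none)    -- [None] * n
  -- res[m] is set on every Pre_ input; the .getD 0 default is never hit there
  (List.range n.toNat).map (fun m => [(res.getD m none).getD 0, (m : Int)])

-- ===== PRECONDITION & SPEC =====
-- Pre_ excludes exactly the inputs on which the Python A raises (ValueError from min([]) when
-- exactly one of R, S is empty and the other has ≥ 2 terms; IndexError from X[i][0] on an empty
-- inner list that is reached), plus the degenerate pair (R=[[]], S=[]) on which A returns [] but
-- the natural B raises IndexError reading r[0].
def Pre_pol_times_pol2 (R : List (List Int)) (S : List (List Int)) : Prop :=
  (R ≠ [] ∧ S ≠ [] ∧ (∀ r ∈ R, r ≠ []) ∧ (∀ s ∈ S, s ≠ []))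
  ∨ (R = [] ∧ S.length ≤ 1)
  ∨ (S = [] ∧ R.length ≤ 1 ∧ (∀ r ∈ R, r ≠ []))
instance (R : List (List Int)) (S : List (List Int)) : Decidable (Pre_pol_times_pol2 R S) := by
  unfold Pre_pol_times_pol2; infer_instance

def pvWitness_pol_times_pol2 : List (List Int) × List (List Int) := ([[1], [2]], [[3]])

def Spec_pol_times_pol2 (R : List (List Int)) (S : List (List Int)) (out : List (List Int)) : Prop := out = pol_times_pol2_alt R S
instance (R : List (List Int)) (S : List (List Int)) (out : List (List Int)) : Decidable (Spec_pol_times_pol2 R S out) := by unfold Spec_pol_times_pol2; infer_instance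

-- ===== CLAIM (what is proved, stated in full; the proofs are below) =====
def Claim_equal_pol_times_pol2 : Prop := ∀ (R : List (List Int)) (S : List (List Int)), Dom_pol_times_pol2 R S → Pre_pol_times_pol2 R S → Spec_pol_times_pol2 R S (pol_times_pol2 R S)

-- ===== LEMMAS AND PROOFS =====

-- the candidate list A builds for degree m
def pvVals (R : List (List Int)) (S : List (List Int)) (m : Int) : List Int :=
  ((PySem.List.pyRange 0 (m + 1)).filter
      (fun i => decide (i ≤ PySem.List.len R - 1 ∧ m - i ≤ PySem.List.len S - 1))).map
    (fun i => pvCoef R i + pvCoef S (m - i))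

-- A's outer loop body, named for the induction
def pvStepA (R : List (List Int)) (S : List (List Int))
    (res : PySem.Dict Int (List Int)) (m : Int) : PySem.Dict Int (List Int) :=
  (PySem.List.pyRange 0 (m + 1)).foldl
    (fun res i =>
      if i ≤ PySem.List.len R - 1 ∧ m - i ≤ PySem.List.len S - 1 then
        res.modify m [] (fun v => v ++ [pvCoef R i + pvCoef S (m - i)])
      else res)
    (res.insert m [])

-- B's cell update, named for the induction
def pvUpd (res : List (Option Int)) (k : Nat) (v : Int) : List (Option Int) :=
  match res.getD k none with
  | none => res.set k (some v)
  | some c => if v < c then res.set k (some v) else res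

def pvOMin (o : Option Int) (v : Int) : Option Int :=
  match o with
  | none => some v
  | some c => some (min c v)

-- the flat (key, value) stream of B's double loop
def pvPairs (R : List (List Int)) (S : List (List Int)) : List (Nat × Int) :=
  (PySem.List.enumerate R).flatMap
    (fun ir => (PySem.List.enumerate S).map
      (fun js => ((ir.1 + js.1).toNat, PySem.List.pyGetD ir.2 0 0 + PySem.List.pyGetD js.2 0 0)))

lemma pvSet_update_of_mem {s : List Int} {l : List Int} (h : ∀ x ∈ l, x ∈ s) :
    PySem.Set.update s l = s := by
  unfold PySem.Set.update
  induction l generalizing s with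
  | nil => rfl
  | cons x t ih =>
    have hx : PySem.Set.add s x = s := by
      have hmem : x ∈ s := h x (List.mem_cons_self)
      simp [PySem.Set.add, PySem.Set.contains, hmem]
    rw [List.foldl_cons, hx]
    exact ih (fun y hy => h y (List.mem_cons_of_mem _ hy))

lemma pvDictA (R S : List (List Int)) (j : Nat) :
    ((PySem.List.pyRange 0 (j : Int)).foldl (pvStepA R S) PySem.Dict.empty).keys
        = PySem.List.pyRange 0 (j : Int)
      ∧ ∀ c : Int,
        ((PySem.List.pyRange 0 (j : Int)).foldl (pvStepA R S) PySem.Dict.empty).getD c []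
          = if 0 ≤ c ∧ c < (j : Int) then pvVals R S c else [] := by
  induction j with
  | zero =>
    refine ⟨by simp [PySem.List.pyRange_one_eq_nil], ?_⟩
    intro c
    rw [if_neg (by push_cast; omega)]
    simp [PySem.List.pyRange_one_eq_nil]
  | succ j ih =>
    obtain ⟨ihk, ihg⟩ := ih
    have hsplit : PySem.List.pyRange 0 ((j + 1 : Nat) : Int)
        = PySem.List.pyRange 0 (j : Int) ++ [(j : Int)] := by
      push_cast
      exact PySem.List.pyRange_one_succ_right (by positivity)
    rw [hsplit, List.foldl_append, List.foldl_cons, List.foldl_nil]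
    set D := (PySem.List.pyRange 0 (j : Int)).foldl (pvStepA R S) PySem.Dict.empty with hD
    have hnotmem : (j : Int) ∉ D.keys := by
      rw [ihk]; simp [PySem.List.mem_pyRange_one]
    have hfresh : D.contains (j : Int) = false :=
      Bool.eq_false_iff.mpr (fun hc => hnotmem ((PySem.Dict.contains_iff_mem_keys D _).1 hc))
    -- rewrite the inner loop as a fold of modify over a pair list
    have hinner : pvStepA R S D (j : Int)
        = (((PySem.List.pyRange 0 ((j : Int) + 1)).filter
              (fun i => decide (i ≤ PySem.List.len R - 1 ∧ (j : Int) - i ≤ PySem.List.len S - 1))).map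
            (fun i => ((j : Int), pvCoef R i + pvCoef S ((j : Int) - i)))).foldl
            (fun d p => d.modify p.1 [] (fun v => v ++ [p.2])) (D.insert (j : Int) []) := by
      unfold pvStepA
      exact (PySem.List.foldl_ite_eq_foldl_filter
        (fun i => i ≤ PySem.List.len R - 1 ∧ (j : Int) - i ≤ PySem.List.len S - 1)
        (fun res i => res.modify (j : Int) [] (fun v => v ++ [pvCoef R i + pvCoef S ((j : Int) - i)]))
        (PySem.List.pyRange 0 ((j : Int) + 1)) (D.insert (j : Int) [])).trans
        (List.foldl_map (f := fun i => ((j : Int), pvCoef R i + pvCoef S ((j : Int) - i)))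
          (g := fun (d : PySem.Dict Int (List Int)) (p : Int × Int) =>
            d.modify p.1 [] (fun v => v ++ [p.2]))).symm
    constructor
    · rw [hinner, PySem.Dict.keys_foldl_modify_key, PySem.Dict.keys_insert_of_not_contains D [] hfresh,
        ihk, pvSet_update_of_mem (by simp; intros; omega)]
    · intro c
      rw [hinner, PySem.Dict.getD_foldl_modify_append]
      by_cases hc : c = (j : Int)
      · subst hc
        rw [PySem.Dict.getD_insert_self]
        rw [if_pos (by constructor <;> push_cast <;> omega)]
        rw [List.filter_map, List.map_map]
        have : (((fun p : Int × Int => p.1 == (j : Int)) ∘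
            fun i => ((j : Int), pvCoef R i + pvCoef S ((j : Int) - i))))
            = fun _ => true := by funext i; simp
        rw [this, List.filter_true]
        rfl
      · rw [PySem.Dict.getD_insert_of_ne D [] [] hc]
        rw [List.filter_map]
        have : (((fun p : Int × Int => p.1 == c) ∘
            fun i => ((j : Int), pvCoef R i + pvCoef S ((j : Int) - i))))
            = fun _ => false := by
          funext i; simp [Ne.symm hc]
        rw [this, List.filter_false]
        rw [ihg c]
        split_ifs with h1 h2 <;> first | (exfalso; omega) | simp

lemma pvA_eq (R S : List (List Int)) :
    pol_times_pol2 R S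
      = (PySem.List.pyRange 0 (PySem.List.len R + PySem.List.len S - 1)).map
          (fun m => [(PySem.List.min? (pvVals R S m) (fun x => x)).getD 0, m]) := by
  have hA : pol_times_pol2 R S
      = ((PySem.List.pyRange 0 (PySem.List.len R - 1 + (PySem.List.len S - 1) + 1)).foldl
            (pvStepA R S) PySem.Dict.empty).items.foldl
          (fun pol_res kv => pol_res ++ [[(PySem.List.min? kv.2 (fun x => x)).getD 0, kv.1]]) [] := rfl
  have hn : PySem.List.len R - 1 + (PySem.List.len S - 1) + 1
      = PySem.List.len R + PySem.List.len S - 1 := by ring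
  rw [hA, hn]
  set N : Int := PySem.List.len R + PySem.List.len S - 1 with hN
  by_cases hpos : 0 ≤ N
  · have hcast : ((N.toNat : Int)) = N := Int.toNat_of_nonneg hpos
    obtain ⟨hk, hg⟩ := pvDictA R S N.toNat
    rw [hcast] at hk hg
    set D := (PySem.List.pyRange 0 N).foldl (pvStepA R S) PySem.Dict.empty with hD
    rw [PySem.Dict.items_eq_map_keys D (by rw [hk]; exact PySem.List.nodup_pyRange_one 0 N) []]
    rw [hk, PySem.List.foldl_append_singleton_eq_map, List.nil_append, List.map_map]
    apply List.map_congr_left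
    intro m hm
    have hmr := PySem.List.mem_pyRange_one.1 hm
    simp only [Function.comp]
    rw [hg m, if_pos ⟨hmr.1, hmr.2⟩]
  · rw [PySem.List.pyRange_one_eq_nil (by omega)]
    simp [PySem.Dict.empty]

lemma pvUpd_length (res : List (Option Int)) (k : Nat) (v : Int) :
    (pvUpd res k v).length = res.length := by
  unfold pvUpd
  cases res.getD k none with
  | none => simp
  | some c => by_cases h : v < c <;> simp [h]

lemma pvCellFold (L : List (Nat × Int)) (res : List (Option Int)) (m : Nat)
    (hm : m < res.length) :
    (L.foldl (fun r kv => pvUpd r kv.1 kv.2) res).getD m none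
      = ((L.filter (fun kv => kv.1 == m)).map (fun kv => kv.2)).foldl pvOMin (res.getD m none) := by
  induction L generalizing res with
  | nil => rfl
  | cons kv t ih =>
    obtain ⟨k, v⟩ := kv
    rw [List.foldl_cons]
    by_cases hk : k = m
    · subst hk
      have hm' : k < (pvUpd res k v).length := by rw [pvUpd_length]; exact hm
      have hget : (pvUpd res k v).getD k none = pvOMin (res.getD k none) v := by
        unfold pvUpd pvOMin
        cases hc : res.getD k none with
        | none => simp [List.getD_eq_getElem?_getD, List.getElem?_set_self hm]
        | some c =>
          by_cases hv : v < c
          · simp [hv, List.getD_eq_getElem?_getD, List.getElem?_set_self hm,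
              min_eq_right (le_of_lt hv)]
          · rw [List.getD_eq_getElem?_getD] at hc
            simp [hv, hc, min_eq_left (not_lt.1 hv), List.getD_eq_getElem?_getD]
      rw [ih (pvUpd res k v) hm', hget]
      simp
    · have hm' : m < (pvUpd res k v).length := by rw [pvUpd_length]; exact hm
      have hget : (pvUpd res k v).getD m none = res.getD m none := by
        unfold pvUpd
        cases res.getD k none with
        | none => simp [List.getD_eq_getElem?_getD, List.getElem?_set_ne hk]
        | some c =>
          by_cases hv : v < c <;>
            simp [hv, List.getD_eq_getElem?_getD, List.getElem?_set_ne hk]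
      rw [ih (pvUpd res k v) hm', hget]
      simp [hk]

lemma pvFoldl_flatMap {α β σ : Type} (g : α → List β) (f : σ → β → σ) (l : List α) (init : σ) :
    (l.flatMap g).foldl f init = l.foldl (fun s a => (g a).foldl f s) init := by
  induction l generalizing init with
  | nil => rfl
  | cons a t ih => simp [List.flatMap_cons, List.foldl_append, ih]

lemma pvFlatMap_if_singleton {α β : Type} (l : List α) (p : α → Prop) [DecidablePred p]
    (f : α → β) :
    l.flatMap (fun a => if p a then [f a] else [])
      = (l.filter (fun a => decide (p a))).map f := by
  induction l with
  | nil => rfl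
  | cons a t ih =>
    by_cases h : p a <;> simp [List.flatMap_cons, h, ih]

lemma pvRow (S : List (List Int)) (i : Int) (hi : 0 ≤ i) (w : Int) (m : Nat) :
    (((PySem.List.enumerate S).map
        (fun js => ((i + js.1).toNat, w + PySem.List.pyGetD js.2 0 0))).filter
        (fun kv => kv.1 == m)).map (fun kv => kv.2)
      = if 0 ≤ (m : Int) - i ∧ (m : Int) - i < PySem.List.len S
        then [w + pvCoef S ((m : Int) - i)] else [] := by
  rw [PySem.List.enumerate_eq_map_pyRange S [], List.map_map, List.filter_map, List.map_map]
  have hpred : ∀ j ∈ PySem.List.pyRange 0 (PySem.List.len S),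
      (((fun kv : Nat × Int => kv.1 == m) ∘
          ((fun js => ((i + js.1).toNat, w + PySem.List.pyGetD js.2 0 0)) ∘
            fun j => (j, PySem.List.pyGetD S j []))) j)
        = (fun j : Int => j == (m : Int) - i) j := by
    intro j hj
    have hj' := PySem.List.mem_pyRange_one.1 hj
    simp only [Function.comp]
    by_cases h : j = (m : Int) - i
    · subst h
      simp
    · have h2 : (i + j).toNat ≠ m := by omega
      simp [h2, h]
  rw [List.filter_congr hpred]
  have hbe : (fun j : Int => j == (m : Int) - i) = (fun j => decide (j = (m : Int) - i)) := by
    funext j; by_cases h : j = (m : Int) - i <;> simp [h]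
  rw [hbe, List.filter_eq]
  by_cases ht : 0 ≤ (m : Int) - i ∧ (m : Int) - i < PySem.List.len S
  · rw [if_pos ht]
    rw [List.count_eq_one_of_mem (PySem.List.nodup_pyRange_one 0 _)
      (PySem.List.mem_pyRange_one.2 ⟨ht.1, ht.2⟩)]
    simp [pvCoef]
  · rw [if_neg ht]
    rw [List.count_eq_zero_of_not_mem (fun hmem => ht
      ⟨(PySem.List.mem_pyRange_one.1 hmem).1, (PySem.List.mem_pyRange_one.1 hmem).2⟩)]
    simp

lemma pvPairsFilter (R S : List (List Int)) (m : Nat) :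
    ((pvPairs R S).filter (fun kv => kv.1 == m)).map (fun kv => kv.2) = pvVals R S (m : Int) := by
  unfold pvPairs
  rw [List.filter_flatMap, List.map_flatMap]
  rw [PySem.List.enumerate_eq_map_pyRange R [], List.flatMap_map]
  have hrow : ∀ a ∈ PySem.List.pyRange 0 (PySem.List.len R),
      (List.map (fun kv : Nat × Int => kv.2)
        (List.filter (fun kv => kv.1 == m)
          (List.map
            (fun js => (((a, PySem.List.pyGetD R a []).1 + js.1).toNat,
              PySem.List.pyGetD (a, PySem.List.pyGetD R a []).2 0 0 + PySem.List.pyGetD js.2 0 0))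
            (PySem.List.enumerate S))))
        = (if 0 ≤ (m : Int) - a ∧ (m : Int) - a < PySem.List.len S
            then [pvCoef R a + pvCoef S ((m : Int) - a)] else []) := by
    intro a ha
    exact pvRow S a (PySem.List.mem_pyRange_one.1 ha).1
      (PySem.List.pyGetD (PySem.List.pyGetD R a []) 0 0) m
  rw [List.flatMap_congr hrow]
  unfold pvVals
  have hidx : (PySem.List.pyRange 0 (PySem.List.len R)).filter
        (fun i => decide (0 ≤ (m : Int) - i ∧ (m : Int) - i < PySem.List.len S))
      = (PySem.List.pyRange 0 ((m : Int) + 1)).filter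
        (fun i => decide (i ≤ PySem.List.len R - 1 ∧ (m : Int) - i ≤ PySem.List.len S - 1)) := by
    have p1 := (PySem.List.pairwise_lt_pyRange_one 0 (PySem.List.len R)).filter
      (fun i => decide (0 ≤ (m : Int) - i ∧ (m : Int) - i < PySem.List.len S))
    have p2 := (PySem.List.pairwise_lt_pyRange_one 0 ((m : Int) + 1)).filter
      (fun i => decide (i ≤ PySem.List.len R - 1 ∧ (m : Int) - i ≤ PySem.List.len S - 1))
    have hperm := (List.perm_ext_iff_of_nodup (p1.imp ne_of_lt) (p2.imp ne_of_lt)).2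
      (fun a => by
        simp only [List.mem_filter, PySem.List.mem_pyRange_one, decide_eq_true_eq,
          PySem.List.len]
        omega)
    exact List.Perm.eq_of_pairwise (fun a b _ _ hab hba => absurd hba (lt_asymm hab)) p1 p2 hperm
  rw [← hidx]
  exact pvFlatMap_if_singleton _ _ _

lemma pvFoldOMin_some (t : List Int) (c : Int) :
    t.foldl pvOMin (some c) = some (t.foldl min c) := by
  induction t generalizing c with
  | nil => rfl
  | cons x t ih => simp [List.foldl_cons, pvOMin, ih]

lemma pvFoldOMin (l : List Int) :
    l.foldl pvOMin none = PySem.List.min? l (fun x => x) := by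
  cases l with
  | nil => rfl
  | cons x t =>
    rw [PySem.List.min?_id_cons]
    simpa [List.foldl_cons, pvOMin] using pvFoldOMin_some t x

lemma pvB_eq (R S : List (List Int)) :
    pol_times_pol2_alt R S
      = (List.range (PySem.List.len R + PySem.List.len S - 1).toNat).map
          (fun m : Nat => [(PySem.List.min? (pvVals R S (m : Int)) (fun x => x)).getD 0,
            (m : Int)]) := by
  have h1 : pol_times_pol2_alt R S
      = (List.range (PySem.List.len R + PySem.List.len S - 1).toNat).map
          (fun m => [(((PySem.List.enumerate R).foldl
              (fun res ir => (PySem.List.enumerate S).foldl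
                (fun res js => pvUpd res ((ir.1 + js.1).toNat)
                  (PySem.List.pyGetD ir.2 0 0 + PySem.List.pyGetD js.2 0 0)) res)
              (List.replicate (PySem.List.len R + PySem.List.len S - 1).toNat none)).getD
            m none).getD 0, (m : Int)]) := rfl
  rw [h1]
  have hres : ∀ init : List (Option Int),
      (PySem.List.enumerate R).foldl
          (fun res ir => (PySem.List.enumerate S).foldl
            (fun res js => pvUpd res ((ir.1 + js.1).toNat)
              (PySem.List.pyGetD ir.2 0 0 + PySem.List.pyGetD js.2 0 0)) res) init
        = (pvPairs R S).foldl (fun r kv => pvUpd r kv.1 kv.2) init := by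
    intro init
    unfold pvPairs
    rw [pvFoldl_flatMap]
    simp only [List.foldl_map]
  rw [hres]
  apply List.map_congr_left
  intro m hm
  have hmlt : m < (PySem.List.len R + PySem.List.len S - 1).toNat := List.mem_range.1 hm
  have hlen : m < (List.replicate (PySem.List.len R + PySem.List.len S - 1).toNat
      (none : Option Int)).length := by simpa using hmlt
  rw [pvCellFold _ _ _ hlen, pvPairsFilter]
  have hinit : (List.replicate (PySem.List.len R + PySem.List.len S - 1).toNat
      (none : Option Int)).getD m none = none := by
    rw [List.getD_eq_getElem?_getD, List.getElem?_replicate]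
    split <;> rfl
  rw [hinit, pvFoldOMin]

-- ===== VERDICT (by name: the statement is the Claim_ definition above) =====
theorem pol_times_pol2_spec : Claim_equal_pol_times_pol2 := by
  intro R S _ _
  unfold Spec_pol_times_pol2
  rw [pvA_eq, pvB_eq, PySem.List.pyRange_one, List.map_map]
  simp only [Int.sub_zero]
  apply List.map_congr_left
  intro k hk
  simp
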